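-- pv_equiv track=rewrite | github.com/hemipaska-maker/bricks-ai | benchmark/showcase/run.py | expand_scenarios
-- ===== SOURCE A (Python) =====
-- def expand_scenarios(raw: list[str]) -> list[str]:
--     """Expand scenario names into individual sub-scenario labels.
--
--     Args:
--         raw: List of scenario names from CLI (e.g. ``['all']``, ``['A2', 'C2']``).
--
--     Returns:
--         De-duplicated, ordered list of individual scenario labels.
--     """
--     order = ["A2-3", "A2-6", "A2-12", "C2", "D2"]
--     selected: set[str] = set()
--
--     for s in raw:
--         if s == "all":
--             selected.update(order)
--         elif s == "A2":
--             selected.update(["A2-3", "A2-6", "A2-12"])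
--         else:
--             selected.add(s)
--
--     return [s for s in order if s in selected]
-- ===== SOURCE B (Python) =====
-- def expand_scenarios(raw: list[str]) -> list[str]:
--     """Expand scenario names into individual sub-scenario labels.
--
--     Single order-driven pass: precompute the set of raw names, then keep each
--     label of the fixed order whose trigger condition matches that set.
--     """
--     order = ["A2-3", "A2-6", "A2-12", "C2", "D2"]
--     a2_subs = {"A2-3", "A2-6", "A2-12"}
--     present = set(raw)
--
--     def triggered(label: str) -> bool:
--         return "all" in present or label in present or (label in a2_subs and "A2" in present)
--
--     return [label for label in order if triggered(label)]
-- ===== Notes on version B (the rewrite author's own statement) =====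
-- stated objective: simpler
-- what changed: B drops A's accumulated 'selected' set: it precomputes present = set(raw) once and does one pass over the fixed order list, keeping each label whose trigger condition ('all' present, the label itself present, or an A2 sub-label with 'A2' present) holds.
import Mathlib
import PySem

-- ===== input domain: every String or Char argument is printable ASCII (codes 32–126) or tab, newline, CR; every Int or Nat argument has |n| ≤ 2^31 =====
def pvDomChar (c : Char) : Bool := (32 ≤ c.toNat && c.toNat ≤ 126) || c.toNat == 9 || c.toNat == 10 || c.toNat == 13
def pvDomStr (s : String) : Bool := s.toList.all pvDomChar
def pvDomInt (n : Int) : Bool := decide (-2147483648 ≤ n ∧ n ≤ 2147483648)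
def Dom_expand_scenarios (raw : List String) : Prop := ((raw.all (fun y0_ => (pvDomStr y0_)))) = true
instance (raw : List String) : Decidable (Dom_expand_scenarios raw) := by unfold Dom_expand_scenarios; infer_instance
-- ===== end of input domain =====

-- B changes the decomposition (precomputed set of raw names + one trigger-driven pass
-- over the fixed order list instead of A's accumulated 'selected' set); objective: simpler.

-- ===== PORT A =====
-- loop body of A's 'for s in raw'
def pvStepA (sel : PySem.Set String) (s : String) : PySem.Set String :=
  if s = "all" then PySem.Set.update sel ["A2-3", "A2-6", "A2-12", "C2", "D2"]
  else if s = "A2" then PySem.Set.update sel ["A2-3", "A2-6", "A2-12"]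
  else PySem.Set.add sel s

def expand_scenarios (raw : List String) : List String :=
  let order : List String := ["A2-3", "A2-6", "A2-12", "C2", "D2"]
  let selected : PySem.Set String := raw.foldl pvStepA PySem.Set.empty
  order.filter (fun s => PySem.Set.contains selected s)

-- ===== PORT B =====
def pvA2Subs : PySem.Set String := PySem.Set.ofList ["A2-3", "A2-6", "A2-12"]

def pvTriggered (present : PySem.Set String) (label : String) : Bool :=
  PySem.Set.contains present "all" || PySem.Set.contains present label
    || (PySem.Set.contains pvA2Subs label && PySem.Set.contains present "A2")

def expand_scenarios_alt (raw : List String) : List String :=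
  let order : List String := ["A2-3", "A2-6", "A2-12", "C2", "D2"]
  let present : PySem.Set String := PySem.Set.ofList raw
  order.filter (fun label => pvTriggered present label)

-- ===== PRECONDITION & SPEC =====
def Spec_expand_scenarios (raw : List String) (out : List String) : Prop := out = expand_scenarios_alt raw
instance (raw : List String) (out : List String) : Decidable (Spec_expand_scenarios raw out) := by unfold Spec_expand_scenarios; infer_instance

-- ===== CLAIM (what is proved, stated in full; the proofs are below) =====
def Claim_equal_expand_scenarios : Prop := ∀ (raw : List String), Dom_expand_scenarios raw → Spec_expand_scenarios raw (expand_scenarios raw)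

-- ===== LEMMAS AND PROOFS =====

-- membership in A's accumulated set, for labels that are neither "all" nor "A2"
lemma pv_mem_foldl_step (raw : List String) (sel : PySem.Set String) (l : String)
    (h1 : l ≠ "all") (h2 : l ≠ "A2") :
    l ∈ raw.foldl pvStepA sel ↔
      l ∈ sel ∨ ("all" ∈ raw ∧ l ∈ (["A2-3", "A2-6", "A2-12", "C2", "D2"] : List String))
        ∨ ("A2" ∈ raw ∧ l ∈ (["A2-3", "A2-6", "A2-12"] : List String)) ∨ l ∈ raw := by
  induction raw generalizing sel with
  | nil => simp
  | cons s rest ih =>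
    simp only [List.foldl_cons, ih, List.mem_cons]
    by_cases hs : s = "all"
    · subst hs
      simp [pvStepA]
      tauto
    · by_cases hs2 : s = "A2"
      · subst hs2
        simp [pvStepA, hs]
        tauto
      · simp [pvStepA, hs, hs2, PySem.Set.mem_add]
        constructor
        · rintro (((h | h) | h) | h) <;> tauto
        · rintro (h | h | h | (h | h)) <;> tauto

-- for each label of the fixed order, A's membership test equals B's trigger
lemma pv_label_eq (raw : List String) (l : String)
    (h1 : l ≠ "all") (h2 : l ≠ "A2")
    (ho : l ∈ (["A2-3", "A2-6", "A2-12", "C2", "D2"] : List String)) :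
    PySem.Set.contains (raw.foldl pvStepA PySem.Set.empty) l
      = pvTriggered (PySem.Set.ofList raw) l := by
  have key := pv_mem_foldl_step raw PySem.Set.empty l h1 h2
  rw [Bool.eq_iff_iff]
  simp only [pvTriggered, pvA2Subs, PySem.Set.contains, Bool.or_eq_true, Bool.and_eq_true,
    List.contains_iff_mem, PySem.Set.mem_ofList, PySem.Set.empty] at *
  simp only [List.not_mem_nil, false_or] at key
  rw [key]
  tauto

-- ===== VERDICT (by name: the statement is the Claim_ definition above) =====
theorem expand_scenarios_spec : Claim_equal_expand_scenarios := by
  intro raw _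
  unfold Spec_expand_scenarios expand_scenarios expand_scenarios_alt
  refine List.filter_congr ?_
  intro x hx
  fin_cases hx <;> exact pv_label_eq raw _ (by decide) (by decide) (by decide)
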